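-- pv_equiv track=rewrite | github.com/Aasthaengg/IBMdataset | Python_codes/p03241/s700696812.py | solve
-- ===== SOURCE A (Python) =====
-- def divisor(n):
--     divisors = []
--     i = 1
--     while i * i <= n:
--         if n % i == 0:
--             divisors.append(i)
--             if i * i != n:
--                 divisors.append(n // i)
--         i += 1
--     return list(sorted(divisors))
--
-- def solve(N, M):
--     D = divisor(M)
--     ans = 1
--     for p in D:
--         n = M // p
--         if n >= N:
--             ans = max(ans, p)
--     return ans
-- ===== SOURCE B (Python) =====
-- def solve(N, M):
--     # Different algorithm: prime-factorize M, then enumerate its divisors by a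
--     # DFS over the prime-power choices, keeping the best divisor p with p*N <= M
--     # (for an exact divisor p of M >= 1, M // p >= N is the same as p*N <= M).
--     fac = []
--     m = M
--     d = 2
--     while d * d <= m:
--         if m % d == 0:
--             e = 0
--             while m % d == 0:
--                 m //= d
--                 e += 1
--             fac.append((d, e))
--         d += 1
--     if m > 1:
--         fac.append((m, 1))
--     best = 1
--
--     def dfs(idx, p):
--         nonlocal best
--         if idx == len(fac):
--             if p * N <= M and best < p:
--                 best = p
--             return
--         q, e = fac[idx]
--         pk = p
--         for _ in range(e + 1):
--             dfs(idx + 1, pk)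
--             pk *= q
--     dfs(0, 1)
--     return best
-- ===== Notes on version B (the rewrite author's own statement) =====
-- stated objective: alternative
-- what changed: B prime-factorizes M and enumerates its divisors by DFS over prime-power choices, selecting the best divisor p with p*N <= M, instead of A's trial-division enumeration of all divisors plus a sort and a selection pass.
import Mathlib
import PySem

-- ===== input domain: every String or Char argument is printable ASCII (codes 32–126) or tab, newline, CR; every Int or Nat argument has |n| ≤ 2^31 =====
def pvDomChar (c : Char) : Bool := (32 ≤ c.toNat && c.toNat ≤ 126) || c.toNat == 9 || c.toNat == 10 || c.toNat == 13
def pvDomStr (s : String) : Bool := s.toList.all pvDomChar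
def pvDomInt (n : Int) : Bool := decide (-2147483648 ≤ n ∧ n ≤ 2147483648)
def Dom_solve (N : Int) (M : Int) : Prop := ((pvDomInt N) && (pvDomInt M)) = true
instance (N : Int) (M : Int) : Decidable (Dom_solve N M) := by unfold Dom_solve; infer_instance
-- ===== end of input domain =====

-- B replaces A's trial-division enumeration of all divisors (plus sort and selection
-- pass) by prime factorization of M followed by a DFS over prime-power choices that
-- keeps the best divisor p with p*N <= M; same return value, different algorithm.

-- ===== PORT A =====
-- termination helpers for the while loops: i*i <= n forces i <= n
theorem pv_d_le (d m : Int) (h : d * d ≤ m) : d ≤ m := by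
  by_cases h0 : d ≤ 0
  · exact le_trans h0 (le_trans (mul_self_nonneg d) h)
  · have h1 : (1:Int) ≤ d := by omega
    calc d = d * 1 := (mul_one d).symm
    _ ≤ d * d := mul_le_mul_of_nonneg_left h1 (by omega)
    _ ≤ m := h

theorem pv_meas_lt (n i : Int) (h : i * i ≤ n) : (n + 1 - (i + 1)).toNat < (n + 1 - i).toNat := by
  have hin : i ≤ n := pv_d_le i n h
  omega

def divisorLoop (n : Int) (i : Int) (acc : List Int) : List Int :=
  if h : i * i ≤ n then
    divisorLoop n (i + 1)
      (acc ++ (if PySem.Int.mod n i = 0 then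
                 i :: (if i * i ≠ n then [PySem.Int.floordiv n i] else [])
               else []))
  else acc
termination_by (n + 1 - i).toNat
decreasing_by exact pv_meas_lt n i h

def divisor (n : Int) : List Int :=
  PySem.List.sorted (divisorLoop n 1 []) (fun x => x) false

def solve (N : Int) (M : Int) : Int :=
  (divisor M).foldl
    (fun ans p =>
      let n := PySem.Int.floordiv M p
      if n ≥ N then max ans p else ans) 1

-- ===== PORT B =====
-- termination helper for B's loops (cited by the ports' decreasing_by)
theorem pv_extract_meas (m d : Int) (hd : 2 ≤ d) (hm : 1 ≤ m) :
    (PySem.Int.floordiv m d).toNat < m.toNat := by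
  have h0 : (0 : Int) < d := by omega
  rw [PySem.Int.floordiv_eq_ediv_of_pos h0]
  have hq0 : 0 ≤ m / d := Int.ediv_nonneg (by omega) (by omega)
  have hdm := Int.mul_ediv_add_emod m d
  have hr0 : 0 ≤ m % d := Int.emod_nonneg m (by omega)
  have h2q : 2 * (m / d) ≤ d * (m / d) := mul_le_mul_of_nonneg_right (by omega) hq0
  have hlt : m / d < m := by linarith
  omega

-- inner while of the factor loop: 'while m % d == 0: m //= d; e += 1'
-- (the 2 ≤ d ∧ 1 ≤ m conjuncts only make the recursion total; they hold at
--  every call reached from solve_alt, so the computation is Python's)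
def extractLoop (m d e : Int) : Int × Int :=
  if h : PySem.Int.mod m d = 0 ∧ 2 ≤ d ∧ 1 ≤ m then
    extractLoop (PySem.Int.floordiv m d) d (e + 1)
  else (m, e)
termination_by m.toNat
decreasing_by exact pv_extract_meas m d h.2.1 h.2.2

theorem pv_extract_fst_le : ∀ (fuel : Nat) (m d e : Int), m.toNat = fuel → 0 ≤ m →
    (extractLoop m d e).1 ≤ m := by
  intro fuel
  induction fuel using Nat.strong_induction_on with
  | _ fuel ih =>
    intro m d e hf hm
    by_cases h : PySem.Int.mod m d = 0 ∧ 2 ≤ d ∧ 1 ≤ m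
    · rw [extractLoop, dif_pos h]
      have hlt := pv_extract_meas m d h.2.1 h.2.2
      have hq0 : 0 ≤ PySem.Int.floordiv m d := by
        rw [PySem.Int.floordiv_eq_ediv_of_pos (by omega : (0:Int) < d)]
        exact Int.ediv_nonneg (by omega) (by omega)
      have := ih (PySem.Int.floordiv m d).toNat (by omega) (PySem.Int.floordiv m d) d (e + 1) rfl hq0
      omega
    · rw [extractLoop, dif_neg h]

-- outer factor loop: 'while d*d <= m: if m % d == 0: (extract) …; d += 1'
def facLoop (m d : Int) (fac : List (Int × Int)) : Int × List (Int × Int) :=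
  if h : d * d ≤ m then
    if PySem.Int.mod m d = 0 then
      facLoop (extractLoop m d 0).1 (d + 1) (fac ++ [(d, (extractLoop m d 0).2)])
    else facLoop m (d + 1) fac
  else (m, fac)
termination_by (m + 1 - d).toNat
decreasing_by
  · have hm0 : 0 ≤ m := le_trans (mul_self_nonneg d) h
    have hle := pv_extract_fst_le m.toNat m d 0 rfl hm0
    have hdm := pv_d_le d m h
    omega
  · exact pv_meas_lt m d h

-- the recursive dfs over fac (best is threaded; the range(e+1) loop is dfsPow)
mutual
def dfsList (N M : Int) (fac : List (Int × Int)) (p best : Int) : Int :=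
  match fac with
  | [] => if p * N ≤ M ∧ best < p then p else best
  | (q, e) :: rest => dfsPow N M q rest (e + 1).toNat p best
termination_by (fac.length + 1, 0)

def dfsPow (N M q : Int) (rest : List (Int × Int)) (k : Nat) (p best : Int) : Int :=
  match k with
  | 0 => best
  | Nat.succ k' => dfsPow N M q rest k' (p * q) (dfsList N M rest p best)
termination_by (rest.length + 1, k)
end

def solve_alt (N : Int) (M : Int) : Int :=
  let r := facLoop M 2 []
  let fac := if 1 < r.1 then r.2 ++ [(r.1, 1)] else r.2
  dfsList N M fac 1 1

-- ===== PRECONDITION & SPEC =====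
def Spec_solve (N : Int) (M : Int) (out : Int) : Prop := out = solve_alt N M
instance (N : Int) (M : Int) (out : Int) : Decidable (Spec_solve N M out) := by unfold Spec_solve; infer_instance

-- ===== CLAIM (what is proved, stated in full; the proofs are below) =====
def Claim_equal_solve : Prop := ∀ (N : Int) (M : Int), Dom_solve N M → Spec_solve N M (solve N M)

-- ===== LEMMAS AND PROOFS =====

-- the per-element update of A's selection loop, and its normalized form
def pvStep (N M ans p : Int) : Int :=
  if PySem.Int.floordiv M p ≥ N then max ans p else ans

def stepC (N M a p : Int) : Int := if p * N ≤ M then max a p else a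

def stepB (N M a p : Int) : Int := if p * N ≤ M ∧ a < p then p else a

theorem pvStep_rcomm (N M a x y : Int) :
    pvStep N M (pvStep N M a x) y = pvStep N M (pvStep N M a y) x := by
  unfold pvStep; split_ifs <;> simp [max_assoc, max_comm x y]

theorem stepB_eq_stepC (N M a p : Int) : stepB N M a p = stepC N M a p := by
  unfold stepB stepC
  by_cases h1 : p * N ≤ M
  · by_cases h2 : a < p
    · simp [h1, h2]; omega
    · simp [h1, h2]; omega
  · simp [h1]

theorem pvStep_eq_stepC_of_dvd (N M a p : Int) (hp : 1 ≤ p) (hd : p ∣ M) :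
    pvStep N M a p = stepC N M a p := by
  obtain ⟨c, hc⟩ := hd
  have hfd : PySem.Int.floordiv M p = c := by
    rw [PySem.Int.floordiv_eq_ediv_of_pos (by omega : (0:Int) < p), hc]
    exact Int.mul_ediv_cancel_left c (by omega)
  have hiff : (PySem.Int.floordiv M p ≥ N) ↔ (p * N ≤ M) := by
    rw [hfd, hc, ge_iff_le]
    constructor
    · intro h; nlinarith
    · intro h; nlinarith
  unfold pvStep stepC
  by_cases h : p * N ≤ M
  · rw [if_pos (hiff.mpr h), if_pos h]
  · rw [if_neg (fun hh => h (hiff.mp hh)), if_neg h]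

-- ------- generic fold-of-max machinery -------
theorem foldl_max_init : ∀ (t : List Int) (b c : Int), t.foldl max (max b c) = max c (t.foldl max b) := by
  intro t
  induction t with
  | nil => intro b c; simp [List.foldl, max_comm]
  | cons a t ih =>
    intro b c
    simp only [List.foldl_cons]
    rw [max_right_comm, ih]

theorem foldl_max_toFinset : ∀ (l : List Int) (b : Int), l.foldl max b = l.toFinset.fold max b id := by
  intro l
  induction l with
  | nil => intro b; simp
  | cons x t ih =>
    intro b
    simp only [List.foldl_cons, List.toFinset_cons, Finset.fold_insert_idem]
    rw [foldl_max_init, ih]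
    rfl

theorem foldl_max_mem_congr (l1 l2 : List Int) (b : Int) (h : ∀ x, x ∈ l1 ↔ x ∈ l2) :
    l1.foldl max b = l2.foldl max b := by
  rw [foldl_max_toFinset, foldl_max_toFinset]
  congr 1
  ext x
  simp only [List.mem_toFinset]
  exact h x

theorem foldl_stepC_filter (N M : Int) : ∀ (l : List Int) (b : Int),
    l.foldl (stepC N M) b = (l.filter (fun p => decide (p * N ≤ M))).foldl max b := by
  intro l
  induction l with
  | nil => intro b; rfl
  | cons x t ih =>
    intro b
    by_cases h : x * N ≤ M
    · simp [stepC, h, List.filter_cons, ih]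
    · simp [stepC, h, List.filter_cons, ih]

-- ------- A-side: the sorted fold, and what divisorLoop enumerates -------
theorem pv_divisorLoop_acc (n : Int) : ∀ k i acc, (n + 1 - i).toNat = k →
    divisorLoop n i acc = acc ++ divisorLoop n i [] := by
  intro k
  induction k with
  | zero =>
    intro i acc hk
    have hno : ¬ i * i ≤ n := by intro h; have := pv_meas_lt n i h; omega
    rw [divisorLoop, dif_neg hno, divisorLoop, dif_neg hno]
    simp
  | succ k ih =>
    intro i acc hk
    by_cases h : i * i ≤ n
    · have hm : (n + 1 - (i + 1)).toNat = k := by have := pv_meas_lt n i h; omega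
      rw [divisorLoop, dif_pos h, ih (i + 1) _ hm]
      conv_rhs => rw [divisorLoop, dif_pos h, ih (i + 1) _ hm]
      simp
    · rw [divisorLoop, dif_neg h, divisorLoop, dif_neg h]; simp

theorem pv_solve_eq_fold (N M : Int) :
    solve N M = (divisorLoop M 1 []).foldl (pvStep N M) 1 := by
  unfold solve divisor
  have hperm : (PySem.List.sorted (divisorLoop M 1 []) (fun x => x) false).Perm (divisorLoop M 1 []) :=
    PySem.List.sorted_perm _ _ _
  exact hperm.foldl_eq' (fun x _ y _ z => pvStep_rcomm N M z x y) 1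

theorem mem_divisorLoop (M : Int) : ∀ (k : Nat) (i x : Int), 1 ≤ i → (M + 1 - i).toNat = k →
    (x ∈ divisorLoop M i [] ↔
      ∃ j, i ≤ j ∧ j * j ≤ M ∧ PySem.Int.mod M j = 0 ∧
        (x = j ∨ (j * j ≠ M ∧ x = PySem.Int.floordiv M j))) := by
  intro k
  induction k with
  | zero =>
    intro i x hi hk
    have hno : ¬ i * i ≤ M := by intro h; have := pv_meas_lt M i h; omega
    rw [divisorLoop, dif_neg hno]
    simp only [List.not_mem_nil, false_iff]
    rintro ⟨j, hij, hjj, -, -⟩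
    have hjM := pv_d_le j M hjj
    omega
  | succ k ih =>
    intro i x hi hk
    by_cases h : i * i ≤ M
    · have hm : (M + 1 - (i + 1)).toNat = k := by have := pv_meas_lt M i h; omega
      rw [divisorLoop, dif_pos h, pv_divisorLoop_acc M k (i + 1) _ hm]
      simp only [List.nil_append, List.mem_append]
      rw [ih (i + 1) x (by omega) hm]
      constructor
      · rintro (hc | ⟨j, hj, hrest⟩)
        · by_cases hmod : PySem.Int.mod M i = 0
          · rw [if_pos hmod] at hc
            rcases List.mem_cons.mp hc with rfl | hc2
            · exact ⟨x, le_refl x, h, hmod, Or.inl rfl⟩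
            · by_cases hne : i * i ≠ M
              · rw [if_pos hne] at hc2
                rcases List.mem_singleton.mp hc2 with rfl
                exact ⟨i, le_refl i, h, hmod, Or.inr ⟨hne, rfl⟩⟩
              · rw [if_neg hne] at hc2
                exact absurd hc2 (List.not_mem_nil)
          · rw [if_neg hmod] at hc
            exact absurd hc (List.not_mem_nil)
        · exact ⟨j, by omega, hrest⟩
      · rintro ⟨j, hij, hjj, hmod, hx⟩
        rcases eq_or_lt_of_le hij with rfl | hlt
        · left
          rw [if_pos hmod]
          rcases hx with rfl | ⟨hne, rfl⟩
          · exact List.mem_cons_self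
          · rw [if_pos hne]
            exact List.mem_cons.mpr (Or.inr (List.mem_singleton.mpr rfl))
        · exact Or.inr ⟨j, by omega, hjj, hmod, hx⟩
    · rw [divisorLoop, dif_neg h]
      simp only [List.not_mem_nil, false_iff]
      rintro ⟨j, hij, hjj, -, -⟩
      have : i * i ≤ j * j := mul_le_mul hij hij (by omega) (by omega)
      exact h (le_trans this hjj)

theorem mem_divisor_iff (M x : Int) (hM : 1 ≤ M) :
    x ∈ divisorLoop M 1 [] ↔ 1 ≤ x ∧ x ∣ M := by
  rw [mem_divisorLoop M (M + 1 - 1).toNat 1 x (le_refl 1) rfl]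
  constructor
  · rintro ⟨j, hj1, hjj, hmod, hx⟩
    have hjd : j ∣ M := (PySem.Int.mod_eq_zero_iff_dvd M j).mp hmod
    obtain ⟨c, hc⟩ := hjd
    have hc1 : 1 ≤ c := by nlinarith
    rcases hx with rfl | ⟨hne, rfl⟩
    · exact ⟨hj1, ⟨c, hc⟩⟩
    · have hfd : PySem.Int.floordiv M j = c := by
        rw [PySem.Int.floordiv_eq_ediv_of_pos (by omega : (0:Int) < j), hc]
        exact Int.mul_ediv_cancel_left c (by omega)
      rw [hfd]
      exact ⟨hc1, ⟨j, by rw [hc]; ring⟩⟩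
  · rintro ⟨hx1, hxd⟩
    obtain ⟨c, hc⟩ := hxd
    have hc1 : 1 ≤ c := by nlinarith
    have hcd : c ∣ M := ⟨x, by rw [hc]; ring⟩
    by_cases hxx : x * x ≤ M
    · exact ⟨x, hx1, hxx, (PySem.Int.mod_eq_zero_iff_dvd M x).mpr ⟨c, hc⟩, Or.inl rfl⟩
    · refine ⟨c, hc1, by nlinarith, (PySem.Int.mod_eq_zero_iff_dvd M c).mpr hcd,
        Or.inr ⟨by nlinarith, ?_⟩⟩
      rw [PySem.Int.floordiv_eq_ediv_of_pos (by omega : (0:Int) < c), hc, mul_comm x c]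
      exact (Int.mul_ediv_cancel_left x (by omega)).symm

-- ------- B-side: the factorization is a good prime factorization -------
def prodPP (l : List (Int × Int)) : Int := l.foldr (fun qe acc => qe.1 ^ qe.2.toNat * acc) 1

theorem prodPP_append (l1 l2 : List (Int × Int)) : prodPP (l1 ++ l2) = prodPP l1 * prodPP l2 := by
  induction l1 with
  | nil => simp [prodPP]
  | cons qe t ih => simp [prodPP, List.foldr_cons] at ih ⊢; rw [ih]; ring

def GoodTail : List (Int × Int) → Int → Prop
  | [], _ => True
  | (q, e) :: t, rest => 2 ≤ q ∧ Prime q ∧ 1 ≤ e ∧ ¬ q ∣ (prodPP t * rest) ∧ GoodTail t rest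

theorem prodPP_pos : ∀ (l : List (Int × Int)) (rest : Int), GoodTail l rest → 1 ≤ prodPP l := by
  intro l
  induction l with
  | nil => intro rest _; simp [prodPP]
  | cons qe t ih =>
    obtain ⟨q, e⟩ := qe
    intro rest hg
    obtain ⟨hq2, -, -, -, hgt⟩ := hg
    have h1 := ih rest hgt
    have h2 : (1:Int) ≤ q ^ e.toNat := one_le_pow₀ (by omega)
    show 1 ≤ q ^ e.toNat * prodPP t
    nlinarith

theorem extract_spec : ∀ (fuel : Nat) (m d e : Int), m.toNat = fuel → 1 ≤ m → 2 ≤ d →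
    ∃ k : Nat, (extractLoop m d e).1 * d ^ k = m ∧ (extractLoop m d e).2 = e + (k : Int) ∧
      ¬ d ∣ (extractLoop m d e).1 ∧ 1 ≤ (extractLoop m d e).1 ∧ (d ∣ m → 1 ≤ k) := by
  intro fuel
  induction fuel using Nat.strong_induction_on with
  | _ fuel ih =>
    intro m d e hf hm hd
    by_cases hmod : PySem.Int.mod m d = 0
    · rw [extractLoop, dif_pos ⟨hmod, hd, hm⟩]
      have hdvd : d ∣ m := (PySem.Int.mod_eq_zero_iff_dvd m d).mp hmod
      obtain ⟨c, hc⟩ := hdvd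
      have hfd : PySem.Int.floordiv m d = c := by
        rw [PySem.Int.floordiv_eq_ediv_of_pos (by omega : (0:Int) < d), hc]
        exact Int.mul_ediv_cancel_left c (by omega)
      have hc1 : 1 ≤ c := by nlinarith
      have hlt := pv_extract_meas m d hd hm
      obtain ⟨k, h1, h2, h3, h4, -⟩ :=
        ih (PySem.Int.floordiv m d).toNat (by omega) (PySem.Int.floordiv m d) d (e + 1) rfl
          (by rw [hfd]; exact hc1) hd
      refine ⟨k + 1, ?_, ?_, h3, h4, fun _ => by omega⟩
      · rw [pow_succ, ← mul_assoc, h1, hfd, hc]; ring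
      · rw [h2]; push_cast; ring
    · rw [extractLoop, dif_neg (fun hh => hmod hh.1)]
      refine ⟨0, by ring, by simp, ?_, hm, ?_⟩
      · intro hdvd
        exact hmod ((PySem.Int.mod_eq_zero_iff_dvd m d).mpr hdvd)
      · intro hdvd
        exact absurd ((PySem.Int.mod_eq_zero_iff_dvd m d).mpr hdvd) hmod

theorem prime_of_min_divisor (m d : Int) (hd : 2 ≤ d) (hm : 1 ≤ m) (hdvd : d ∣ m)
    (hmin : ∀ j, 2 ≤ j → j < d → ¬ j ∣ m) : Prime d := by
  rw [Int.prime_iff_natAbs_prime]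
  rw [Nat.prime_def_lt]
  refine ⟨by omega, ?_⟩
  intro a ha hadvd
  by_contra hne
  have ha0 : a ≠ 0 := by
    rintro rfl
    have := Nat.eq_zero_of_zero_dvd hadvd
    omega
  have ha2 : 2 ≤ a := by omega
  have haInt : (a : Int) ∣ d := by
    have h1 : (a : Int) ∣ (d.natAbs : Int) := Int.natCast_dvd_natCast.mpr hadvd
    rwa [Int.natAbs_of_nonneg (by omega : (0:Int) ≤ d)] at h1
  exact hmin (a : Int) (by exact_mod_cast ha2) (by omega) (haInt.trans hdvd)

theorem prime_of_no_small (m : Int) (hm : 1 < m)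
    (h : ∀ j, 2 ≤ j → j * j ≤ m → ¬ j ∣ m) : Prime m := by
  rw [Int.prime_iff_natAbs_prime]
  by_contra hnp
  have hpf := Nat.minFac_dvd m.natAbs
  have hpp : (m.natAbs).minFac.Prime := Nat.minFac_prime (by omega)
  have hsq : (m.natAbs).minFac ^ 2 ≤ m.natAbs := Nat.minFac_sq_le_self (by omega) hnp
  have h2le := hpp.two_le
  apply h ((m.natAbs).minFac : Int) (by exact_mod_cast h2le) ?_ ?_
  · have h1 : ((m.natAbs).minFac : Int) ^ 2 ≤ (m.natAbs : Int) := by exact_mod_cast hsq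
    rw [Int.natAbs_of_nonneg (by omega : (0:Int) ≤ m)] at h1
    nlinarith [h1]
  · have h1 : ((m.natAbs).minFac : Int) ∣ (m.natAbs : Int) := Int.natCast_dvd_natCast.mpr hpf
    rwa [Int.natAbs_of_nonneg (by omega : (0:Int) ≤ m)] at h1

theorem facLoop_spec : ∀ (fuel : Nat) (m d : Int) (fac : List (Int × Int)),
    (m + 1 - d).toNat = fuel → 2 ≤ d → 1 ≤ m → (∀ j, 2 ≤ j → j < d → ¬ j ∣ m) →
    ∃ tl, (facLoop m d fac).2 = fac ++ tl ∧ 1 ≤ (facLoop m d fac).1 ∧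
      prodPP tl * (facLoop m d fac).1 = m ∧ GoodTail tl (facLoop m d fac).1 ∧
      (∀ j, 2 ≤ j → j * j ≤ (facLoop m d fac).1 → ¬ j ∣ (facLoop m d fac).1) := by
  intro fuel
  induction fuel using Nat.strong_induction_on with
  | _ fuel ih =>
    intro m d fac hf hd hm hmin
    by_cases hg : d * d ≤ m
    · have hdm : d ≤ m := pv_d_le d m hg
      by_cases hmod : PySem.Int.mod m d = 0
      · rw [facLoop, dif_pos hg, if_pos hmod]
        have hdvd : d ∣ m := (PySem.Int.mod_eq_zero_iff_dvd m d).mp hmod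
        obtain ⟨k, hk1, hk2, hk3, hk4, hk5⟩ := extract_spec m.toNat m d 0 rfl hm hd
        have hkpos : 1 ≤ k := hk5 hdvd
        have hdk : d ≤ d ^ k := le_self_pow₀ (by omega) (by omega)
        have hm'le : (extractLoop m d 0).1 ≤ m := by nlinarith
        have hmin' : ∀ j, 2 ≤ j → j < d + 1 → ¬ j ∣ (extractLoop m d 0).1 := by
          intro j hj2 hjd hjm'
          rcases eq_or_lt_of_le (by omega : j ≤ d) with rfl | hjlt
          · exact hk3 hjm'
          · exact hmin j hj2 hjlt (hjm'.trans ⟨d ^ k, hk1.symm⟩)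
        have hfuel' : ((extractLoop m d 0).1 + 1 - (d + 1)).toNat < fuel := by omega
        obtain ⟨tl, h1, h2, h3, h4, h5⟩ :=
          ih _ hfuel' (extractLoop m d 0).1 (d + 1) (fac ++ [(d, (extractLoop m d 0).2)]) rfl
            (by omega) hk4 hmin'
        refine ⟨(d, (extractLoop m d 0).2) :: tl, ?_, h2, ?_, ?_, h5⟩
        · rw [h1]; simp
        · show d ^ ((extractLoop m d 0).2).toNat * prodPP tl * _ = m
          rw [mul_assoc, h3, hk2]
          have hknat : ((0 : Int) + (k : Int)).toNat = k := by omega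
          rw [hknat]
          exact (mul_comm _ _).trans hk1
        · refine ⟨hd, prime_of_min_divisor m d hd hm hdvd hmin, ?_, ?_, h4⟩
          · rw [hk2]; omega
          · rw [h3]; exact hk3
      · rw [facLoop, dif_pos hg, if_neg hmod]
        have hmin' : ∀ j, 2 ≤ j → j < d + 1 → ¬ j ∣ m := by
          intro j hj2 hjd hjm
          rcases eq_or_lt_of_le (by omega : j ≤ d) with rfl | hjlt
          · exact hmod ((PySem.Int.mod_eq_zero_iff_dvd m j).mpr hjm)
          · exact hmin j hj2 hjlt hjm
        exact ih ((m + 1 - (d + 1)).toNat) (by omega) m (d + 1) fac rfl (by omega) hm hmin'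
    · rw [facLoop, dif_neg hg]
      refine ⟨[], by simp, hm, by simp [prodPP], trivial, ?_⟩
      intro j hj2 hjj hjm
      have hjd : j < d := by nlinarith
      exact hmin j hj2 hjd hjm

-- the factor list solve_alt builds (same expression as in solve_alt)
def facM (M : Int) : List (Int × Int) :=
  if 1 < (facLoop M 2 []).1 then (facLoop M 2 []).2 ++ [((facLoop M 2 []).1, 1)]
  else (facLoop M 2 []).2

theorem goodTail_append_last : ∀ (tl : List (Int × Int)) (m' : Int),
    GoodTail tl m' → 2 ≤ m' → Prime m' → GoodTail (tl ++ [(m', 1)]) 1 := by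
  intro tl
  induction tl with
  | nil =>
    intro m' _ hm2 hp
    refine ⟨hm2, hp, le_refl 1, ?_, trivial⟩
    intro hdvd
    have := Int.le_of_dvd one_pos (by simpa [prodPP] using hdvd)
    omega
  | cons qe t ih =>
    obtain ⟨q, e⟩ := qe
    intro m' hg hm2 hp
    obtain ⟨hq2, hqp, he1, hnd, hgt⟩ := hg
    refine ⟨hq2, hqp, he1, ?_, ih m' hgt hm2 hp⟩
    intro hdvd
    apply hnd
    have heq : prodPP (t ++ [(m', 1)]) * 1 = prodPP t * m' := by
      rw [prodPP_append]; simp [prodPP]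
    simp only [List.append_eq] at hdvd
    rwa [heq] at hdvd

theorem facM_spec (M : Int) (hM : 1 ≤ M) : GoodTail (facM M) 1 ∧ prodPP (facM M) = M := by
  obtain ⟨tl, h1, h2, h3, h4, h5⟩ :=
    facLoop_spec (M + 1 - 2).toNat M 2 [] rfl (le_refl 2) hM (by intro j hj2 hj3 _; omega)
  by_cases hr : 1 < (facLoop M 2 []).1
  · have hrp : Prime (facLoop M 2 []).1 := prime_of_no_small _ hr h5
    unfold facM
    rw [if_pos hr, h1]
    simp only [List.nil_append]
    refine ⟨goodTail_append_last tl _ h4 (by omega) hrp, ?_⟩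
    rw [prodPP_append]
    have : prodPP [((facLoop M 2 []).1, 1)] = (facLoop M 2 []).1 := by simp [prodPP]
    rw [this, h3]
  · have hr1 : (facLoop M 2 []).1 = 1 := by omega
    unfold facM
    rw [if_neg hr, h1]
    simp only [List.nil_append]
    rw [hr1] at h3 h4
    exact ⟨h4, by simpa using h3⟩

-- ------- B-side: what the dfs computes -------
mutual
def genList : List (Int × Int) → Int → List Int
  | [], p => [p]
  | (q, e) :: rest, p => genPow q rest (e + 1).toNat p
termination_by fac _ => (fac.length + 1, 0)

def genPow (q : Int) (rest : List (Int × Int)) (k : Nat) (p : Int) : List Int :=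
  match k with
  | 0 => []
  | Nat.succ k' => genList rest p ++ genPow q rest k' (p * q)
termination_by (rest.length + 1, k)
end

theorem dfs_eq (N M : Int) : ∀ (fac : List (Int × Int)) (p best : Int),
    dfsList N M fac p best = (genList fac p).foldl (stepB N M) best := by
  intro fac
  induction fac with
  | nil => intro p best; simp [dfsList, genList, stepB]
  | cons qe rest ih =>
    obtain ⟨q, e⟩ := qe
    intro p best
    simp only [dfsList, genList]
    generalize (e + 1).toNat = k
    induction k generalizing p best with
    | zero => simp [dfsPow, genPow]
    | succ k ihk => simp [dfsPow, genPow, List.foldl_append, ih, ihk]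

theorem mem_genPow (q : Int) (rest : List (Int × Int)) :
    ∀ (k : Nat) (p x : Int), (x ∈ genPow q rest k p ↔ ∃ i, i < k ∧ x ∈ genList rest (p * q ^ i)) := by
  intro k
  induction k with
  | zero => intro p x; simp [genPow]
  | succ k ih =>
    intro p x
    rw [genPow]
    simp only [List.mem_append, ih]
    constructor
    · rintro (h | ⟨i, hik, hx⟩)
      · exact ⟨0, by omega, by simpa using h⟩
      · refine ⟨i + 1, by omega, ?_⟩
        have heq : p * q ^ (i + 1) = p * q * q ^ i := by ring
        rwa [heq]
    · rintro ⟨i, hik, hx⟩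
      cases i with
      | zero => left; simpa using hx
      | succ i =>
        right
        refine ⟨i, by omega, ?_⟩
        have heq : p * q * q ^ i = p * q ^ (i + 1) := by ring
        rwa [heq]

theorem dvd_prime_pow_mul (q R : Int) (hq : Prime q) (hq2 : 2 ≤ q) (hR : 1 ≤ R)
    (hqR : ¬ q ∣ R) : ∀ (e : Nat) (y : Int), 1 ≤ y → y ∣ q ^ e * R →
    ∃ k, k ≤ e ∧ ∃ z, 1 ≤ z ∧ z ∣ R ∧ y = q ^ k * z := by
  intro e
  induction e with
  | zero =>
    intro y hy hdvd
    exact ⟨0, le_refl 0, y, hy, by simpa using hdvd, by ring⟩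
  | succ e ih =>
    intro y hy hdvd
    by_cases hqy : q ∣ y
    · obtain ⟨y', hy'⟩ := hqy
      have hy'1 : 1 ≤ y' := by nlinarith
      have hstep : y' ∣ q ^ e * R := by
        have h1 : q * y' ∣ q * (q ^ e * R) := by
          rw [← hy']
          have : q * (q ^ e * R) = q ^ (e + 1) * R := by ring
          rwa [this]
        exact (mul_dvd_mul_iff_left (by omega : q ≠ 0)).mp h1
      obtain ⟨k, hk, z, hz, hzR, hyz⟩ := ih y' hy'1 hstep
      exact ⟨k + 1, by omega, z, hz, hzR, by rw [hy', hyz]; ring⟩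
    · have hcop : IsCoprime q y := (hq.coprime_iff_not_dvd).mpr hqy
      have hcop2 : IsCoprime y (q ^ (e + 1)) := (hcop.symm).pow_right
      have hyR : y ∣ R := hcop2.dvd_of_dvd_mul_left hdvd
      exact ⟨0, by omega, y, hy, hyR, by ring⟩

theorem mem_genList : ∀ (fac : List (Int × Int)) (rest p x : Int), GoodTail fac rest → 1 ≤ p →
    (x ∈ genList fac p ↔ ∃ y, 1 ≤ y ∧ y ∣ prodPP fac ∧ x = p * y) := by
  intro fac
  induction fac with
  | nil =>
    intro rest p x _ hp
    simp only [genList, List.mem_singleton]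
    constructor
    · rintro rfl
      exact ⟨1, le_refl 1, by simp [prodPP], by ring⟩
    · rintro ⟨y, hy, hdvd, rfl⟩
      have hle : y ≤ 1 := Int.le_of_dvd one_pos (by simpa [prodPP] using hdvd)
      have : y = 1 := by omega
      rw [this]; ring
  | cons qe t ih =>
    obtain ⟨q, e⟩ := qe
    intro rest p x hg hp
    obtain ⟨hq2, hqp, he1, hqnd, hgt⟩ := hg
    have hqndt : ¬ q ∣ prodPP t := fun h => hqnd (h.mul_right rest)
    have hPt : 1 ≤ prodPP t := prodPP_pos t rest hgt
    have hprod : prodPP ((q, e) :: t) = q ^ e.toNat * prodPP t := rfl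
    simp only [genList]
    rw [mem_genPow]
    constructor
    · rintro ⟨i, hik, hx⟩
      have hqi : (1:Int) ≤ q ^ i := one_le_pow₀ (by omega)
      have hpq : 1 ≤ p * q ^ i := by nlinarith
      rw [ih rest (p * q ^ i) x hgt hpq] at hx
      obtain ⟨z, hz1, hzt, hxz⟩ := hx
      refine ⟨q ^ i * z, by nlinarith, ?_, by rw [hxz]; ring⟩
      rw [hprod]
      exact mul_dvd_mul (pow_dvd_pow q (by omega : i ≤ e.toNat)) hzt
    · rintro ⟨y, hy1, hyd, rfl⟩
      rw [hprod] at hyd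
      obtain ⟨k, hk, z, hz1, hzt, rfl⟩ :=
        dvd_prime_pow_mul q (prodPP t) hqp hq2 hPt hqndt e.toNat y hy1 hyd
      refine ⟨k, by omega, ?_⟩
      have hqk : (1:Int) ≤ q ^ k := one_le_pow₀ (by omega)
      rw [ih rest (p * q ^ k) _ hgt (by nlinarith)]
      exact ⟨z, hz1, hzt, by ring⟩

theorem mem_Blist (M x : Int) (hM : 1 ≤ M) :
    x ∈ genList (facM M) 1 ↔ (1 ≤ x ∧ x ∣ M) := by
  obtain ⟨hg, hp⟩ := facM_spec M hM
  rw [mem_genList (facM M) 1 1 x hg (le_refl 1)]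
  constructor
  · rintro ⟨y, hy, hyd, rfl⟩
    rw [hp] at hyd
    exact ⟨by omega, by simpa using hyd⟩
  · rintro ⟨hx1, hxd⟩
    exact ⟨x, hx1, by rw [hp]; exact hxd, by ring⟩

theorem solve_alt_eq_fold (N M : Int) :
    solve_alt N M = (genList (facM M) 1).foldl (stepB N M) 1 := by
  rw [← dfs_eq]
  rfl

-- ------- the final assembly -------
theorem pv_solve_eq (N M : Int) : solve N M = solve_alt N M := by
  by_cases hM : 1 ≤ M
  · have hstepBC : stepB N M = stepC N M :=
      funext fun a => funext fun p => stepB_eq_stepC N M a p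
    rw [pv_solve_eq_fold, solve_alt_eq_fold, hstepBC]
    have hcongr : (divisorLoop M 1 []).foldl (pvStep N M) 1
        = (divisorLoop M 1 []).foldl (stepC N M) 1 := by
      apply PySem.List.foldl_congr_mem
      intro acc x hx
      exact pvStep_eq_stepC_of_dvd N M acc x
        ((mem_divisor_iff M x hM).mp hx).1 ((mem_divisor_iff M x hM).mp hx).2
    rw [hcongr, foldl_stepC_filter, foldl_stepC_filter]
    apply foldl_max_mem_congr
    intro x
    simp only [List.mem_filter]
    rw [mem_divisor_iff M x hM, mem_Blist M x hM]
  · have hM0 : M ≤ 0 := by omega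
    have h1 : divisorLoop M 1 [] = [] := by
      rw [divisorLoop, dif_neg (by omega : ¬ (1:Int) * 1 ≤ M)]
    have hA : solve N M = 1 := by
      rw [pv_solve_eq_fold, h1]
      rfl
    have h2 : facLoop M 2 [] = (M, []) := by
      rw [facLoop, dif_neg (by omega : ¬ (2:Int) * 2 ≤ M)]
    have hB : solve_alt N M = 1 := by
      show dfsList N M (if 1 < (facLoop M 2 []).1 then _ else (facLoop M 2 []).2) 1 1 = 1
      rw [h2]
      simp only [show ¬ (1:Int) < M by omega, if_neg, not_false_iff]
      simp [dfsList]
    rw [hA, hB]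

-- ===== VERDICT (by name: the statement is the Claim_ definition above) =====
theorem solve_spec : Claim_equal_solve := by
  intro N M _
  exact pv_solve_eq N M
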